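-- pv_equiv track=rewrite | github.com/qian-o/Metal.NET | .github/scripts/extract_metal_api.py | _should_prefer_framework
-- ===== SOURCE A (Python) =====
-- FRAMEWORKS = ("Metal", "MetalFX")
--
-- def _should_prefer_framework(new_item: dict, existing: dict) -> bool:
--     """Decide whether *new_item*'s framework should replace *existing*'s.
--
--     Categories carry the framework of the header they were found in (e.g.
--     CoreImage, QuartzCore) rather than the framework that owns the type.
--     Prefer the framework from a non-category declaration.  When both (or
--     neither) are categories, prefer a WANTED framework (Metal/MetalFX).
--     """
--     new_kind = new_item.get("kind", "")
--     old_kind = existing.get("kind", "")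
--     new_fw = new_item.get("framework") or ""
--     old_fw = existing.get("framework") or ""
--
--     # Non-category beats category
--     if old_kind == "category" and new_kind != "category":
--         return True
--     if old_kind != "category" and new_kind == "category":
--         return False
--
--     # Both same category status — prefer a WANTED framework
--     new_wanted = any(new_fw == f for f in FRAMEWORKS)
--     old_wanted = any(old_fw == f for f in FRAMEWORKS)
--     if new_wanted and not old_wanted:
--         return True
--
--     return False
-- ===== SOURCE B (Python) =====
-- FRAMEWORKS = ("Metal", "MetalFX")
--
-- # Explicit priority ladder: each item is mapped to a symbolic class and the
-- # classes are compared by their position in the ladder (low = least preferred).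
-- _PRIORITY = [
--     ("category", "other"),
--     ("category", "wanted"),
--     ("declaration", "other"),
--     ("declaration", "wanted"),
-- ]
--
--
-- def _klass(item: dict) -> tuple:
--     kind = "category" if item.get("kind", "") == "category" else "declaration"
--     fw = "wanted" if (item.get("framework") or "") in FRAMEWORKS else "other"
--     return (kind, fw)
--
--
-- def _should_prefer_framework(new_item: dict, existing: dict) -> bool:
--     return _PRIORITY.index(_klass(new_item)) > _PRIORITY.index(_klass(existing))
-- ===== Notes on version B (the rewrite author's own statement) =====
-- stated objective: alternative
-- what changed: Replaces the four-way if-chain with a table-driven ranking: each item is mapped to a symbolic class (category/declaration, wanted/other) and the positions of the two classes in an explicit 4-entry priority ladder are compared with list.index.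
import Mathlib
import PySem

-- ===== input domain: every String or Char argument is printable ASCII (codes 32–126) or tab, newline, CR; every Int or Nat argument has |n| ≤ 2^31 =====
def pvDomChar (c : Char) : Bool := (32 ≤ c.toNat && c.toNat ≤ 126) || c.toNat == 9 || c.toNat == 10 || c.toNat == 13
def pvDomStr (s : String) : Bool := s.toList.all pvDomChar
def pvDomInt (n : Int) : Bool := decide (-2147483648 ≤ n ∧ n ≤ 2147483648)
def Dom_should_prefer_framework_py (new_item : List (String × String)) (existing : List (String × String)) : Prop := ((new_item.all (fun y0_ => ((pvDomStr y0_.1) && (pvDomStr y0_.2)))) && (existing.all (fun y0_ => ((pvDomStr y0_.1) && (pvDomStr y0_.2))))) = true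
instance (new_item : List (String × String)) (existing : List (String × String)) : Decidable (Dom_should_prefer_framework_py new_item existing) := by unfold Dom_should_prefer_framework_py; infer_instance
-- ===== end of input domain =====

-- B maps each item to a symbolic class and compares positions in an explicit priority ladder, replacing A's four-way if-chain (objective: alternative).

-- ===== PORT A =====
-- `item.get("framework") or ""`: values are strings, so only "" is falsy (exact)
def spfFwA (item : List (String × String)) : String :=
  match PySem.Dict.get? (PySem.Dict.mk item) "framework" with
  | some s => if s = "" then "" else s
  | none => ""

def should_prefer_framework_py (new_item : List (String × String)) (existing : List (String × String)) : Bool :=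
  let new_kind := PySem.Dict.getD (PySem.Dict.mk new_item) "kind" ""
  let old_kind := PySem.Dict.getD (PySem.Dict.mk existing) "kind" ""
  let new_fw := spfFwA new_item
  let old_fw := spfFwA existing
  if old_kind == "category" && !(new_kind == "category") then true
  else if !(old_kind == "category") && new_kind == "category" then false
  else
    let new_wanted := ["Metal", "MetalFX"].any (fun f => new_fw == f)
    let old_wanted := ["Metal", "MetalFX"].any (fun f => old_fw == f)
    if new_wanted && !old_wanted then true else false

-- ===== PORT B =====
-- the priority ladder _PRIORITY, least preferred first
def spfLadder : List (String × String) :=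
  [("category", "other"), ("category", "wanted"),
   ("declaration", "other"), ("declaration", "wanted")]

-- _klass(item)
def spfKlass (item : List (String × String)) : String × String :=
  (if PySem.Dict.getD (PySem.Dict.mk item) "kind" "" == "category" then "category" else "declaration",
   if ["Metal", "MetalFX"].contains
        (match PySem.Dict.get? (PySem.Dict.mk item) "framework" with
         | some s => if s = "" then "" else s
         | none => "")
      then "wanted" else "other")

-- _PRIORITY.index: the class is always one of the four ladder entries, so .index never raises; getD 0 is unreachable
def spfIndex (k : String × String) : Nat := (PySem.List.index? spfLadder k).getD 0

def should_prefer_framework_py_alt (new_item : List (String × String)) (existing : List (String × String)) : Bool :=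
  decide (spfIndex (spfKlass new_item) > spfIndex (spfKlass existing))

-- ===== PRECONDITION & SPEC =====
def Spec_should_prefer_framework_py (new_item : List (String × String)) (existing : List (String × String)) (out : Bool) : Prop := out = should_prefer_framework_py_alt new_item existing
instance (new_item : List (String × String)) (existing : List (String × String)) (out : Bool) : Decidable (Spec_should_prefer_framework_py new_item existing out) := by unfold Spec_should_prefer_framework_py; infer_instance

-- ===== CLAIM (what is proved, stated in full; the proofs are below) =====
def Claim_equal_should_prefer_framework_py : Prop := ∀ (new_item : List (String × String)) (existing : List (String × String)), Dom_should_prefer_framework_py new_item existing → Spec_should_prefer_framework_py new_item existing (should_prefer_framework_py new_item existing)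

-- ===== LEMMAS AND PROOFS =====
-- A's if-chain as a function of the four boolean tests equals the ladder-index comparison on the corresponding classes
theorem spf_key (nk ok nw ow : Bool) :
    (if ok && !nk then true else if !ok && nk then false else if nw && !ow then true else false)
    = decide (spfIndex (if nk then "category" else "declaration", if nw then "wanted" else "other")
            > spfIndex (if ok then "category" else "declaration", if ow then "wanted" else "other")) := by
  cases nk <;> cases ok <;> cases nw <;> cases ow <;> decide

theorem spf_wanted (fw : String) :
    ["Metal", "MetalFX"].any (fun f => fw == f) = ["Metal", "MetalFX"].contains fw := by
  cases h1 : fw == "Metal" <;> cases h2 : fw == "MetalFX" <;>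
    simp [List.contains, List.elem, List.any, h1, h2]

-- ===== VERDICT (by name: the statement is the Claim_ definition above) =====
theorem should_prefer_framework_py_spec : Claim_equal_should_prefer_framework_py := by
  intro n e _
  unfold Spec_should_prefer_framework_py should_prefer_framework_py should_prefer_framework_py_alt spfKlass
  simp only [spf_wanted]
  rw [spf_key (PySem.Dict.getD (PySem.Dict.mk n) "kind" "" == "category")
        (PySem.Dict.getD (PySem.Dict.mk e) "kind" "" == "category")]
  unfold spfFwA
  rfl
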